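-- pv_equiv track=rewrite | github.com/RogerDevCode/basic-booking | scripts/fix-all-contracts.py | fix_return_statement
-- ===== SOURCE A (Python) =====
-- def analyze_return_statement(ret_lines):
--     """Analyze what fields are present in a return statement"""
--     code = '\n'.join([line for _, line in ret_lines])
--
--     fields = {
--         'success': 'success:' in code or '"success":' in code,
--         'error_code': 'error_code:' in code or '"error_code":' in code,
--         'error_message': 'error_message:' in code or '"error_message":' in code,
--         'data': 'data:' in code or '"data":' in code,
--         '_meta': '_meta:' in code or '"_meta":' in code
--     }
--
--     return fields
--
-- def fix_return_statement(ret_lines, workflow_id):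
--     """Fix a return statement to have all required fields"""
--     fields = analyze_return_statement(ret_lines)
--     missing = [k for k, v in fields.items() if not v]
--
--     if not missing:
--         return ret_lines, False
--
--     # Build the complete return
--     lines = [line for _, line in ret_lines]
--     code = '\n'.join(lines)
--
--     # Strategy: Find where to insert missing fields
--     # Look for the last field before closing braces
--
--     new_lines = []
--     modified = False
--
--     for i, (line_num, line) in enumerate(ret_lines):
--         # Check if this is near the end of the return
--         if i == len(ret_lines) - 1 or i == len(ret_lines) - 2:
--             # This is one of the last lines
--             # Add missing fields before the closing braces
--
--             if 'success' in missing and 'success:' not in line: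
--                 # Determine if this looks like an error
--                 is_error = 'error' in code.lower() or 'fail' in code.lower()
--                 indent = '      '
--                 new_lines.append((line_num, f"{indent}success: {str(not is_error).lower()},"))
--                 missing.remove('success')
--                 modified = True
--
--             if 'error_code' in missing and 'error_code:' not in line:
--                 indent = '      '
--                 if 'error' in code.lower():
--                     new_lines.append((line_num, f"{indent}error_code: 'PROCESSING_ERROR',"))
--                 else:
--                     new_lines.append((line_num, f"{indent}error_code: null,"))
--                 missing.remove('error_code')
--                 modified = True
--
--             if 'error_message' in missing and 'error_message:' not in line:
--                 indent = '      '
--                 if 'error' in code.lower():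
--                     new_lines.append((line_num, f"{indent}error_message: 'Processing error',"))
--                 else:
--                     new_lines.append((line_num, f"{indent}error_message: null,"))
--                 missing.remove('error_message')
--                 modified = True
--
--             if 'data' in missing and 'data:' not in line:
--                 indent = '      '
--                 new_lines.append((line_num, f"{indent}data: null,"))
--                 missing.remove('data')
--                 modified = True
--
--             if '_meta' in missing and '_meta:' not in line:
--                 indent = '      '
--                 new_lines.append((line_num, f"{indent}_meta: {{"))
--                 new_lines.append((line_num, f"{indent}  source: 'subworkflow',"))
--                 new_lines.append((line_num, f"{indent}  timestamp: new Date().toISOString(),"))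
--                 new_lines.append((line_num, f"{indent}  workflow_id: WORKFLOW_ID"))
--                 new_lines.append((line_num, f"{indent}}},"))
--                 missing.remove('_meta')
--                 modified = True
--
--         new_lines.append((line_num, line))
--
--     return new_lines, modified
-- ===== SOURCE B (Python) =====
-- # B: table-driven splice. Compute the insertion index max(len-2, 0) directly,
-- # build the generated lines from a field table, and splice the list once.
--
-- FIELDS = (
--     ('success', 'success:', '"success":'),
--     ('error_code', 'error_code:', '"error_code":'),
--     ('error_message', 'error_message:', '"error_message":'),
--     ('data', 'data:', '"data":'),
--     ('_meta', '_meta:', '"_meta":'),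
-- )
--
-- def _field_lines(key, is_error, has_err):
--     if key == 'success':
--         return ['      success: ' + ('false' if is_error else 'true') + ',']
--     if key == 'error_code':
--         return ["      error_code: 'PROCESSING_ERROR'," if has_err else '      error_code: null,']
--     if key == 'error_message':
--         return ["      error_message: 'Processing error'," if has_err else '      error_message: null,']
--     if key == 'data':
--         return ['      data: null,']
--     return ['      _meta: {',
--             "        source: 'subworkflow',",
--             '        timestamp: new Date().toISOString(),',
--             '        workflow_id: WORKFLOW_ID',
--             '      },']
--
-- def fix_return_statement(ret_lines, workflow_id):
--     code = '\n'.join(line for _, line in ret_lines)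
--     missing = [k for k, p1, p2 in FIELDS if p1 not in code and p2 not in code]
--     if not ret_lines or not missing:
--         return list(ret_lines), False
--     low = code.lower()
--     has_err = 'error' in low
--     is_error = has_err or 'fail' in low
--     idx = max(len(ret_lines) - 2, 0)
--     num = ret_lines[idx][0]
--     gen = [(num, text) for k in missing for text in _field_lines(k, is_error, has_err)]
--     return ret_lines[:idx] + gen + ret_lines[idx:], True
-- ===== Notes on version B (the rewrite author's own statement) =====
-- stated objective: simpler
-- what changed: Replaces A's per-line scan with its last-two special case and five in-loop if-blocks that mutate the missing list by a direct computation: the insertion point is max(len-2,0), the generated lines come from a key->lines table iterated over the missing list, and the result is a single list splice.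
import Mathlib
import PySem

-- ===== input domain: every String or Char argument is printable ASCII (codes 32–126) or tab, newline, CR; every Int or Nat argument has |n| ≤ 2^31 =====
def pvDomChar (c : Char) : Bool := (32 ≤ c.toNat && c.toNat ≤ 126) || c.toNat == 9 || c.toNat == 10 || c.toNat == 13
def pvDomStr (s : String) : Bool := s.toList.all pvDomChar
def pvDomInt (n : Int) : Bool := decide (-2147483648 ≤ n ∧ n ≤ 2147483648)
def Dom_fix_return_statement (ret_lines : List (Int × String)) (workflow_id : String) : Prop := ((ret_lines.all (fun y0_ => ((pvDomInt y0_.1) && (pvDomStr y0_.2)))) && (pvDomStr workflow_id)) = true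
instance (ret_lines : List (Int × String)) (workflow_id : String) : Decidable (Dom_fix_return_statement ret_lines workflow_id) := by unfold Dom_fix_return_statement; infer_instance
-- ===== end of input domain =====

-- B replaces A's whole-list scan with its last-two special case and in-loop state machine by a
-- direct single splice at index max(len-2,0) driven by a field table (objective: simpler).

-- ===== PORT A =====
def analyze_return_statement (ret_lines : List (Int × String)) : List (String × Bool) :=
  let code := PySem.Str.join "\n" (ret_lines.map (fun p => p.2))
  [("success", PySem.Str.isIn "success:" code || PySem.Str.isIn "\"success\":" code),
   ("error_code", PySem.Str.isIn "error_code:" code || PySem.Str.isIn "\"error_code\":" code),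
   ("error_message", PySem.Str.isIn "error_message:" code || PySem.Str.isIn "\"error_message\":" code),
   ("data", PySem.Str.isIn "data:" code || PySem.Str.isIn "\"data\":" code),
   ("_meta", PySem.Str.isIn "_meta:" code || PySem.Str.isIn "\"_meta\":" code)]

-- one of A's five identical blocks: "if k in missing and pat not in line: new_lines.append(gen);
-- missing.remove(k); modified = True" acting on the state (new_lines, missing, modified).
-- remove is guarded by 'k in missing', so remove? is always some; getD only totalizes it.
def blockA (key pat : String) (gen : List (Int × String)) (line : String)
    (st : List (Int × String) × List String × Bool) : List (Int × String) × List String × Bool :=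
  if st.2.1.contains key && !(PySem.Str.isIn pat line) then
    (st.1 ++ gen, (PySem.List.remove? st.2.1 key).getD st.2.1, true)
  else st

-- A's for-loop over enumerate(ret_lines); the five blocks run in A's order (success first, _meta last).
def fixLoopA (code : String) (n : Int) :
    Nat → List (Int × String) → List (Int × String) → List String → Bool →
    (List (Int × String)) × Bool
  | _, [], new_lines, _, modified => (new_lines, modified)
  | i, (line_num, line) :: rest, new_lines, missing, modified =>
    let st :=
      if (i : Int) = n - 1 ∨ (i : Int) = n - 2 then
        blockA "_meta" "_meta:"
          [(line_num, "      _meta: {"),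
           (line_num, "        source: 'subworkflow',"),
           (line_num, "        timestamp: new Date().toISOString(),"),
           (line_num, "        workflow_id: WORKFLOW_ID"),
           (line_num, "      },")] line
        (blockA "data" "data:" [(line_num, "      data: null,")] line
        (blockA "error_message" "error_message:"
          [(line_num,
            if PySem.Str.isIn "error" (PySem.Str.lower code)
            then "      error_message: 'Processing error'," else "      error_message: null,")] line
        (blockA "error_code" "error_code:"
          [(line_num,
            if PySem.Str.isIn "error" (PySem.Str.lower code)
            then "      error_code: 'PROCESSING_ERROR'," else "      error_code: null,")] line
        (blockA "success" "success:"
          [(line_num, "      success: " ++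
             (if PySem.Str.isIn "error" (PySem.Str.lower code) || PySem.Str.isIn "fail" (PySem.Str.lower code)
              then "false" else "true") ++ ",")] line
        (new_lines, missing, modified)))))
      else (new_lines, missing, modified)
    fixLoopA code n (i + 1) rest (st.1 ++ [(line_num, line)]) st.2.1 st.2.2

def fix_return_statement (ret_lines : List (Int × String)) (workflow_id : String) : (List (Int × String)) × Bool :=
  let fields := analyze_return_statement ret_lines
  let missing := (fields.filter (fun p => !p.2)).map (fun p => p.1)
  if missing.isEmpty then (ret_lines, false)
  else
    let code := PySem.Str.join "\n" (ret_lines.map (fun p => p.2))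
    fixLoopA code (ret_lines.length : Int) 0 ret_lines [] missing false

-- ===== PORT B =====
-- (key, plain pattern, quoted pattern) in the analyze dict order
def pvFields : List (String × String × String) :=
  [("success", "success:", "\"success\":"),
   ("error_code", "error_code:", "\"error_code\":"),
   ("error_message", "error_message:", "\"error_message\":"),
   ("data", "data:", "\"data\":"),
   ("_meta", "_meta:", "\"_meta\":")]

def pvFieldLines (key : String) (is_error has_err : Bool) : List String :=
  if key = "success" then
    ["      success: " ++ (if is_error then "false" else "true") ++ ","]
  else if key = "error_code" then
    [if has_err then "      error_code: 'PROCESSING_ERROR'," else "      error_code: null,"]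
  else if key = "error_message" then
    [if has_err then "      error_message: 'Processing error'," else "      error_message: null,"]
  else if key = "data" then
    ["      data: null,"]
  else
    ["      _meta: {",
     "        source: 'subworkflow',",
     "        timestamp: new Date().toISOString(),",
     "        workflow_id: WORKFLOW_ID",
     "      },"]

def fix_return_statement_alt (ret_lines : List (Int × String)) (workflow_id : String) : (List (Int × String)) × Bool :=
  let code := PySem.Str.join "\n" (ret_lines.map (fun p => p.2))
  let missing := (pvFields.filter
      (fun f => !(PySem.Str.isIn f.2.1 code) && !(PySem.Str.isIn f.2.2 code))).map (fun f => f.1)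
  if ret_lines.isEmpty || missing.isEmpty then (ret_lines, false)
  else
    let low := PySem.Str.lower code
    let has_err := PySem.Str.isIn "error" low
    let is_error := has_err || PySem.Str.isIn "fail" low
    let idx := ret_lines.length - 2        -- max(len(ret_lines)-2, 0): Nat subtraction is exactly this max
    let num := (ret_lines.getD idx (0, "")).1   -- ret_lines[idx][0]; idx < length, the default is never read
    let gen := missing.flatMap (fun k => (pvFieldLines k is_error has_err).map (fun t => (num, t)))
    -- ret_lines[:idx] / ret_lines[idx:] with 0 ≤ idx = take / drop
    (ret_lines.take idx ++ gen ++ ret_lines.drop idx, true)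

-- ===== PRECONDITION & SPEC =====
def Spec_fix_return_statement (ret_lines : List (Int × String)) (workflow_id : String) (out : (List (Int × String)) × Bool) : Prop := out = fix_return_statement_alt ret_lines workflow_id
instance (ret_lines : List (Int × String)) (workflow_id : String) (out : (List (Int × String)) × Bool) : Decidable (Spec_fix_return_statement ret_lines workflow_id out) := by unfold Spec_fix_return_statement; infer_instance

-- ===== CLAIM (what is proved, stated in full; the proofs are below) =====
def Claim_equal_fix_return_statement : Prop := ∀ (ret_lines : List (Int × String)) (workflow_id : String), Dom_fix_return_statement ret_lines workflow_id → Spec_fix_return_statement ret_lines workflow_id (fix_return_statement ret_lines workflow_id)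

-- ===== LEMMAS AND PROOFS =====

-- the explicit shape of a missing-field list: a sublist of the five keys in canonical order
def msOf (m1 m2 m3 m4 m5 : Bool) : List String :=
  (if m1 then ["success"] else []) ++ (if m2 then ["error_code"] else []) ++
  (if m3 then ["error_message"] else []) ++ (if m4 then ["data"] else []) ++
  (if m5 then ["_meta"] else [])

theorem mem_intersperse (cs sep : List Char) (t : List (List Char)) (hm : cs ∈ t) :
    cs ∈ t.intersperse sep := by
  induction t with
  | nil => cases hm
  | cons x t ih =>
    rcases List.mem_cons.1 hm with rfl | hm'
    · cases t <;> simp [List.intersperse]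
    · cases t with
      | nil => cases hm'
      | cons y t' =>
        simp only [List.intersperse]
        exact List.mem_cons_of_mem _ (List.mem_cons_of_mem _ (ih hm'))

theorem infix_chars_join (cs : List Char) (ls : List (List Char)) (sep : List Char)
    (h : cs ∈ ls) : cs <:+: PySem.Chars.join sep ls := by
  simp only [PySem.Chars.join, List.intercalate]
  exact List.infix_of_mem_flatten (mem_intersperse _ _ _ h)

-- a pattern absent from '\n'.join(parts) is absent from every part
theorem notin_line (pat line : String) (parts : List String)
    (h : PySem.Str.isIn pat (PySem.Str.join "\n" parts) = false) (hm : line ∈ parts) :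
    PySem.Str.isIn pat line = false := by
  cases hb : PySem.Str.isIn pat line with
  | false => rfl
  | true =>
    exfalso
    have h1 : pat.toList <:+: line.toList := (PySem.Str.isIn_iff_infix _ _).1 hb
    have h2 : line.toList <:+: (PySem.Str.join "\n" parts).toList := by
      rw [PySem.Str.toList_join]
      exact infix_chars_join _ _ _ (List.mem_map_of_mem hm)
    have h3 := (PySem.Str.isIn_iff_infix pat (PySem.Str.join "\n" parts)).2 (h1.trans h2)
    rw [h] at h3
    exact Bool.noConfusion h3

-- membership / removal facts about msOf, at the state each block sees
theorem mem_msOf1 : ∀ m1 m2 m3 m4 m5 : Bool, ("success" ∈ msOf m1 m2 m3 m4 m5) ↔ m1 = true := by decide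
theorem mem_msOf2 : ∀ m2 m3 m4 m5 : Bool, ("error_code" ∈ msOf false m2 m3 m4 m5) ↔ m2 = true := by decide
theorem mem_msOf3 : ∀ m3 m4 m5 : Bool, ("error_message" ∈ msOf false false m3 m4 m5) ↔ m3 = true := by decide
theorem mem_msOf4 : ∀ m4 m5 : Bool, ("data" ∈ msOf false false false m4 m5) ↔ m4 = true := by decide
theorem mem_msOf5 : ∀ m5 : Bool, ("_meta" ∈ msOf false false false false m5) ↔ m5 = true := by decide
theorem remove_msOf1 : ∀ m2 m3 m4 m5 : Bool,
    (PySem.List.remove? (msOf true m2 m3 m4 m5) "success").getD (msOf true m2 m3 m4 m5) = msOf false m2 m3 m4 m5 := by decide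
theorem remove_msOf2 : ∀ m3 m4 m5 : Bool,
    (PySem.List.remove? (msOf false true m3 m4 m5) "error_code").getD (msOf false true m3 m4 m5) = msOf false false m3 m4 m5 := by decide
theorem remove_msOf3 : ∀ m4 m5 : Bool,
    (PySem.List.remove? (msOf false false true m4 m5) "error_message").getD (msOf false false true m4 m5) = msOf false false false m4 m5 := by decide
theorem remove_msOf4 : ∀ m5 : Bool,
    (PySem.List.remove? (msOf false false false true m5) "data").getD (msOf false false false true m5) = msOf false false false false m5 := by decide
theorem remove_msOf5 :
    (PySem.List.remove? (msOf false false false false true) "_meta").getD (msOf false false false false true) = msOf false false false false false := by decide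

theorem blockA_success (gen : List (Int × String)) (line : String) (nl : List (Int × String))
    (md m1 m2 m3 m4 m5 : Bool)
    (hl : m1 = true → PySem.Str.isIn "success:" line = false) :
    blockA "success" "success:" gen line (nl, msOf m1 m2 m3 m4 m5, md)
      = (nl ++ (if m1 then gen else []), msOf false m2 m3 m4 m5, md || m1) := by
  cases m1
  · simp [blockA, mem_msOf1]
  · have hl' := hl rfl
    simp at hl'
    simp [blockA, mem_msOf1, hl', remove_msOf1]

theorem blockA_error_code (gen : List (Int × String)) (line : String) (nl : List (Int × String))
    (md m2 m3 m4 m5 : Bool)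
    (hl : m2 = true → PySem.Str.isIn "error_code:" line = false) :
    blockA "error_code" "error_code:" gen line (nl, msOf false m2 m3 m4 m5, md)
      = (nl ++ (if m2 then gen else []), msOf false false m3 m4 m5, md || m2) := by
  cases m2
  · simp [blockA, mem_msOf2]
  · have hl' := hl rfl
    simp at hl'
    simp [blockA, mem_msOf2, hl', remove_msOf2]

theorem blockA_error_message (gen : List (Int × String)) (line : String) (nl : List (Int × String))
    (md m3 m4 m5 : Bool)
    (hl : m3 = true → PySem.Str.isIn "error_message:" line = false) :
    blockA "error_message" "error_message:" gen line (nl, msOf false false m3 m4 m5, md)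
      = (nl ++ (if m3 then gen else []), msOf false false false m4 m5, md || m3) := by
  cases m3
  · simp [blockA, mem_msOf3]
  · have hl' := hl rfl
    simp at hl'
    simp [blockA, mem_msOf3, hl', remove_msOf3]

theorem blockA_data (gen : List (Int × String)) (line : String) (nl : List (Int × String))
    (md m4 m5 : Bool)
    (hl : m4 = true → PySem.Str.isIn "data:" line = false) :
    blockA "data" "data:" gen line (nl, msOf false false false m4 m5, md)
      = (nl ++ (if m4 then gen else []), msOf false false false false m5, md || m4) := by
  cases m4
  · simp [blockA, mem_msOf4]
  · have hl' := hl rfl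
    simp at hl'
    simp [blockA, mem_msOf4, hl', remove_msOf4]

theorem blockA_meta (gen : List (Int × String)) (line : String) (nl : List (Int × String))
    (md m5 : Bool)
    (hl : m5 = true → PySem.Str.isIn "_meta:" line = false) :
    blockA "_meta" "_meta:" gen line (nl, msOf false false false false m5, md)
      = (nl ++ (if m5 then gen else []), msOf false false false false false, md || m5) := by
  cases m5
  · simp [blockA, mem_msOf5]
  · have hl' := hl rfl
    simp at hl'
    simp [blockA, mem_msOf5, hl', remove_msOf5]

theorem flatMap_if_single (m : Bool) (k : String) (f : String → List (Int × String)) :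
    (if m then [k] else []).flatMap f = if m then f k else [] := by
  cases m <;> simp

-- once missing is empty the loop just copies the remaining lines
theorem fixLoopA_empty (code : String) (n : Int) :
    ∀ (rest : List (Int × String)) (i : Nat) (nl : List (Int × String)) (md : Bool),
      fixLoopA code n i rest nl [] md = (nl ++ rest, md) := by
  intro rest
  induction rest with
  | nil => intro i nl md; simp [fixLoopA]
  | cons a t ih =>
    intro i nl md
    obtain ⟨ln, s⟩ := a
    simp [fixLoopA, blockA, ih]

-- lines before the last two are copied unchanged
theorem fixLoopA_skip (code : String) (n : Int) (tl : List (Int × String)) :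
    ∀ (pre : List (Int × String)) (i : Nat) (nl : List (Int × String)) (ms : List String) (md : Bool),
      (i : Int) + ((pre ++ tl).length : Int) = n → tl.length = 2 →
      fixLoopA code n i (pre ++ tl) nl ms md = fixLoopA code n (i + pre.length) tl (nl ++ pre) ms md := by
  intro pre
  induction pre with
  | nil => intro i nl ms md _ _; simp
  | cons a t ih =>
    intro i nl ms md hn htl
    obtain ⟨ln, s⟩ := a
    have hcond : ¬ ((i : Int) = n - 1 ∨ (i : Int) = n - 2) := by
      simp only [List.length_append, List.length_cons] at hn
      push_cast at hn
      omega
    show fixLoopA code n i ((ln, s) :: (t ++ tl)) nl ms md = _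
    rw [fixLoopA]
    simp only [if_neg hcond]
    rw [ih (i + 1) (nl ++ [(ln, s)]) ms md
      (by simp only [List.length_append, List.length_cons] at hn ⊢; push_cast at hn ⊢; omega) htl]
    have h2 : i + 1 + t.length = i + (t.length + 1) := by omega
    rw [h2]
    simp

-- a line in the last-two zone: every still-missing field is inserted before it, missing empties
theorem fixLoopA_fire (code : String) (n : Int) (i : Nat) (a : Int × String)
    (rest nl : List (Int × String)) (md : Bool) (m1 m2 m3 m4 m5 : Bool)
    (hc : (i : Int) = n - 1 ∨ (i : Int) = n - 2)
    (h1 : m1 = true → PySem.Str.isIn "success:" a.2 = false)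
    (h2 : m2 = true → PySem.Str.isIn "error_code:" a.2 = false)
    (h3 : m3 = true → PySem.Str.isIn "error_message:" a.2 = false)
    (h4 : m4 = true → PySem.Str.isIn "data:" a.2 = false)
    (h5 : m5 = true → PySem.Str.isIn "_meta:" a.2 = false) :
    fixLoopA code n i (a :: rest) nl (msOf m1 m2 m3 m4 m5) md =
      fixLoopA code n (i + 1) rest
        (nl ++ (msOf m1 m2 m3 m4 m5).flatMap (fun k =>
            (pvFieldLines k
              (PySem.Str.isIn "error" (PySem.Str.lower code) || PySem.Str.isIn "fail" (PySem.Str.lower code))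
              (PySem.Str.isIn "error" (PySem.Str.lower code))).map (fun t => (a.1, t))) ++ [a])
        [] (md || (m1 || m2 || m3 || m4 || m5)) := by
  obtain ⟨ln, s⟩ := a
  simp only at h1 h2 h3 h4 h5
  rw [fixLoopA, if_pos hc]
  rw [blockA_success _ _ _ _ _ _ _ _ _ h1, blockA_error_code _ _ _ _ _ _ _ _ h2,
      blockA_error_message _ _ _ _ _ _ _ h3, blockA_data _ _ _ _ _ _ h4, blockA_meta _ _ _ _ _ h5]
  simp only [msOf, List.flatMap_append, flatMap_if_single, pvFieldLines]
  simp [List.append_assoc, Bool.or_assoc]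

theorem msOf_or (m1 m2 m3 m4 m5 : Bool) (h : (msOf m1 m2 m3 m4 m5).isEmpty = false) :
    (m1 || m2 || m3 || m4 || m5) = true := by
  revert h
  cases m1 <;> cases m2 <;> cases m3 <;> cases m4 <;> cases m5 <;> decide

theorem filterA (b1 b2 b3 b4 b5 : Bool) :
    (([("success", b1), ("error_code", b2), ("error_message", b3), ("data", b4), ("_meta", b5)].filter
        (fun p => !p.2)).map (fun p => p.1)) = msOf (!b1) (!b2) (!b3) (!b4) (!b5) := by
  cases b1 <;> cases b2 <;> cases b3 <;> cases b4 <;> cases b5 <;> decide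

theorem filterB (P : String × String × String → Bool) :
    (pvFields.filter P).map (fun f => f.1)
      = msOf (P ("success", "success:", "\"success\":"))
             (P ("error_code", "error_code:", "\"error_code\":"))
             (P ("error_message", "error_message:", "\"error_message\":"))
             (P ("data", "data:", "\"data\":"))
             (P ("_meta", "_meta:", "\"_meta\":")) := by
  cases hP1 : P ("success", "success:", "\"success\":") <;>
  cases hP2 : P ("error_code", "error_code:", "\"error_code\":") <;>
  cases hP3 : P ("error_message", "error_message:", "\"error_message\":") <;>
  cases hP4 : P ("data", "data:", "\"data\":") <;>
  cases hP5 : P ("_meta", "_meta:", "\"_meta\":") <;>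
    simp [pvFields, List.filter, msOf, hP1, hP2, hP3, hP4, hP5]

theorem exists_last_two {A : Type} (a b : A) (t : List A) : ∃ pre u v, a :: b :: t = pre ++ [u, v] := by
  induction t generalizing a b with
  | nil => exact ⟨[], a, b, rfl⟩
  | cons c t ih =>
    obtain ⟨pre, u, v, h⟩ := ih b c
    exact ⟨a :: pre, u, v, by rw [List.cons_append, ← h]⟩

-- ===== VERDICT (by name: the statement is the Claim_ definition above) =====
theorem fix_return_statement_spec : Claim_equal_fix_return_statement := by
  intro rl wf _
  unfold Spec_fix_return_statement fix_return_statement fix_return_statement_alt analyze_return_statement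
  simp only []
  set code := PySem.Str.join "\n" (rl.map (fun p => p.2)) with hcode
  rw [filterA, filterB]
  simp only [Bool.not_or]
  set c1 : Bool := !PySem.Str.isIn "success:" code && !PySem.Str.isIn "\"success\":" code with hc1
  set c2 : Bool := !PySem.Str.isIn "error_code:" code && !PySem.Str.isIn "\"error_code\":" code with hc2
  set c3 : Bool := !PySem.Str.isIn "error_message:" code && !PySem.Str.isIn "\"error_message\":" code with hc3
  set c4 : Bool := !PySem.Str.isIn "data:" code && !PySem.Str.isIn "\"data\":" code with hc4
  set c5 : Bool := !PySem.Str.isIn "_meta:" code && !PySem.Str.isIn "\"_meta\":" code with hc5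
  by_cases hE : (msOf c1 c2 c3 c4 c5).isEmpty
  · simp [hE]
  · -- some field is missing
    have hor := msOf_or c1 c2 c3 c4 c5 (by revert hE; cases (msOf c1 c2 c3 c4 c5).isEmpty <;> simp)
    have hline : ∀ pat : String, PySem.Str.isIn pat code = false →
        ∀ p ∈ rl, PySem.Str.isIn pat p.2 = false := by
      intro pat h p hp
      rw [hcode] at h
      exact notin_line _ _ _ h (List.mem_map_of_mem hp)
    have hmk : ∀ p ∈ rl,
        (c1 = true → PySem.Str.isIn "success:" p.2 = false) ∧
        (c2 = true → PySem.Str.isIn "error_code:" p.2 = false) ∧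
        (c3 = true → PySem.Str.isIn "error_message:" p.2 = false) ∧
        (c4 = true → PySem.Str.isIn "data:" p.2 = false) ∧
        (c5 = true → PySem.Str.isIn "_meta:" p.2 = false) := by
      intro p hp
      refine ⟨fun hm => ?_, fun hm => ?_, fun hm => ?_, fun hm => ?_, fun hm => ?_⟩
      · rw [hc1] at hm; simp only [Bool.and_eq_true, Bool.not_eq_true'] at hm
        exact hline _ hm.1 p hp
      · rw [hc2] at hm; simp only [Bool.and_eq_true, Bool.not_eq_true'] at hm
        exact hline _ hm.1 p hp
      · rw [hc3] at hm; simp only [Bool.and_eq_true, Bool.not_eq_true'] at hm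
        exact hline _ hm.1 p hp
      · rw [hc4] at hm; simp only [Bool.and_eq_true, Bool.not_eq_true'] at hm
        exact hline _ hm.1 p hp
      · rw [hc5] at hm; simp only [Bool.and_eq_true, Bool.not_eq_true'] at hm
        exact hline _ hm.1 p hp
    rw [if_neg hE]
    match hrl : rl with
    | [] => simp [fixLoopA]
    | [a] =>
      obtain ⟨h1, h2, h3, h4, h5⟩ := hmk a (by simp)
      rw [fixLoopA_fire code (([a].length : Nat) : Int) 0 a [] [] false c1 c2 c3 c4 c5
            (Or.inl (by simp)) h1 h2 h3 h4 h5, fixLoopA_empty]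
      have hE' : (msOf c1 c2 c3 c4 c5).isEmpty = false := by
        revert hE; cases (msOf c1 c2 c3 c4 c5).isEmpty <;> simp
      simp [hor, hE']
    | a :: b :: t =>
      obtain ⟨pre, u, v, heq⟩ := exists_last_two a b t
      rw [heq]
      obtain ⟨h1, h2, h3, h4, h5⟩ := hmk u (by rw [heq]; simp)
      rw [fixLoopA_skip code _ [u, v] pre 0 [] (msOf c1 c2 c3 c4 c5) false (by simp) rfl]
      simp only [Nat.zero_add, List.nil_append]
      rw [fixLoopA_fire code (((pre ++ [u, v]).length : Nat) : Int) pre.length u [v] pre false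
            c1 c2 c3 c4 c5 (Or.inr (by simp [List.length_append])) h1 h2 h3 h4 h5,
          fixLoopA_empty]
      have hidx : (pre ++ [u, v]).length - 2 = pre.length := by simp
      rw [hidx, List.take_left, List.drop_left]
      have hnum : (pre ++ [u, v]).getD pre.length (0, "") = u := by
        rw [List.getD_eq_getElem?_getD, List.getElem?_append_right (Nat.le_refl _)]
        simp
      rw [hnum]
      have hE' : (msOf c1 c2 c3 c4 c5).isEmpty = false := by
        revert hE; cases (msOf c1 c2 c3 c4 c5).isEmpty <;> simp
      simp [List.append_assoc, hor, hE']
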